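-- pv_equiv track=rewrite | github.com/Teaching-projects/SOE-ProgAlap1-HF-2020-hbela | 101/main.py | eletek
-- ===== SOURCE A (Python) =====
-- def eletek(osszes:int,elhasznalt:int)->str:
--     """Visszaad egy olyan szöveget, ami egy indikátor arra, hány életünk van még.
--
--     A szöveg elején van annyi 😄 ahány életünk még maradt, majd annyi 💀 ahányat már "eljátszottunk".
--
--     Args:
--         osszes (int): az összes életünk száma
--         elhasznalt (int): az eljátszott életek (rossz betű tippek) száma
--
--     Returns:
--         str: 😄😄😄💀💀 formátumú indikátor (a példa adatai: 5 összes, 2 elhasznált)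
--     """
--     sor = ""
--     elet = osszes - elhasznalt
--     for i in range(osszes):
--         if elet > 0:
--             sor += '😄'
--             elet -= 1
--         else: sor += '💀'
--     return sor
-- ===== SOURCE B (Python) =====
-- def eletek(osszes: int, elhasznalt: int) -> str:
--     happy = max(0, min(osszes, osszes - elhasznalt))
--     return '😄' * happy + '💀' * (osszes - happy)
-- ===== Notes on version B (the rewrite author's own statement) =====
-- stated objective: simpler
-- what changed: Replaces the per-life loop with a closed-form clamped happy count and two string multiplications.
import Mathlib
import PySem

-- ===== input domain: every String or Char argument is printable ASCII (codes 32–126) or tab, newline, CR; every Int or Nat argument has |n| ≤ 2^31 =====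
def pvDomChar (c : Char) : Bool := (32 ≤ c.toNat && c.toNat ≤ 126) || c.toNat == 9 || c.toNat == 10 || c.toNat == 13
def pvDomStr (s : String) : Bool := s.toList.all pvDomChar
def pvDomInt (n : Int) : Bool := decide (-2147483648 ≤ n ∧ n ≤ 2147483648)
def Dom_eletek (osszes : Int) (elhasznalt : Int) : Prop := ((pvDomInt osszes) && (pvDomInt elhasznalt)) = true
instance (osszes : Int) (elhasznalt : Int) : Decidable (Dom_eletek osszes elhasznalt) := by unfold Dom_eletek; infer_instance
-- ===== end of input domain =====

-- B replaces A's per-life loop by a closed-form clamped happy count and two repetitions (simpler, same values).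

-- ===== PORT A =====
def eletek (osszes : Int) (elhasznalt : Int) : String :=
  let sor : String := ""
  let elet : Int := osszes - elhasznalt
  let r := (PySem.List.pyRange 0 osszes 1).foldl
    (fun (st : String × Int) _ =>
      if st.2 > 0 then (st.1 ++ "😄", st.2 - 1) else (st.1 ++ "💀", st.2))
    (sor, elet)
  r.1

-- ===== PORT B =====
def eletek_alt (osszes : Int) (elhasznalt : Int) : String :=
  let happy : Int := max 0 (min osszes (osszes - elhasznalt))
  -- '😄' * happy + '💀' * (osszes - happy); Python turns a negative count into ''
  String.ofList (List.replicate happy.toNat '😄') ++ String.ofList (List.replicate (osszes - happy).toNat '💀')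

-- ===== PRECONDITION & SPEC =====
def Spec_eletek (osszes : Int) (elhasznalt : Int) (out : String) : Prop := out = eletek_alt osszes elhasznalt
instance (osszes : Int) (elhasznalt : Int) (out : String) : Decidable (Spec_eletek osszes elhasznalt out) := by unfold Spec_eletek; infer_instance

-- ===== CLAIM (what is proved, stated in full; the proofs are below) =====
def Claim_equal_eletek : Prop := ∀ (osszes : Int) (elhasznalt : Int), Dom_eletek osszes elhasznalt → Spec_eletek osszes elhasznalt (eletek osszes elhasznalt)

-- ===== LEMMAS AND PROOFS =====

-- loop characterisation: after folding over any list, the accumulated string is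
-- the start string, then min elet.toNat len happy faces, then the rest skulls
theorem eletek_loop (l : List Int) (sor : List Char) (elet : Int) :
    (l.foldl
      (fun (st : String × Int) _ =>
        if st.2 > 0 then (st.1 ++ "😄", st.2 - 1) else (st.1 ++ "💀", st.2))
      (String.ofList sor, elet)).1
    = String.ofList (sor ++ List.replicate (min elet.toNat l.length) '😄'
        ++ List.replicate (l.length - min elet.toNat l.length) '💀') := by
  induction l generalizing sor elet with
  | nil => simp
  | cons x xs ih =>
    by_cases h : elet > 0
    · have h1 : (String.ofList sor) ++ "😄" = String.ofList (sor ++ ['😄']) := by simp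
      simp only [List.foldl_cons, h, if_pos, h1, ih]
      have h2 : min elet.toNat (x :: xs).length = min (elet - 1).toNat xs.length + 1 := by
        simp only [List.length_cons]; omega
      rw [h2]
      have h3 : (x :: xs).length - (min (elet - 1).toNat xs.length + 1)
          = xs.length - min (elet - 1).toNat xs.length := by
        simp only [List.length_cons]; omega
      rw [h3]
      congr 1
      simp [List.replicate_succ]
    · have h1 : (String.ofList sor) ++ "💀" = String.ofList (sor ++ ['💀']) := by simp
      simp only [List.foldl_cons, if_neg h, h1, ih]
      have h2 : min elet.toNat (x :: xs).length = 0 := by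
        simp only [List.length_cons]; omega
      have h2' : min elet.toNat xs.length = 0 := by omega
      rw [h2, h2']
      simp [List.replicate_succ]

-- ===== VERDICT (by name: the statement is the Claim_ definition above) =====
theorem eletek_spec : Claim_equal_eletek := by
  intro osszes elhasznalt _
  show eletek osszes elhasznalt = eletek_alt osszes elhasznalt
  unfold eletek eletek_alt
  have hs : ("" : String) = String.ofList [] := rfl
  rw [hs, eletek_loop]
  have hlen : (PySem.List.pyRange 0 osszes 1).length = osszes.toNat := by
    simp [PySem.List.length_pyRange_one]
  rw [hlen]
  have h1 : min (osszes - elhasznalt).toNat osszes.toNat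
      = (max 0 (min osszes (osszes - elhasznalt))).toNat := by omega
  rw [h1]
  have h2 : osszes.toNat - (max 0 (min osszes (osszes - elhasznalt))).toNat
      = (osszes - max 0 (min osszes (osszes - elhasznalt))).toNat := by omega
  rw [h2]
  simp
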